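-- pv_equiv track=rewrite | github.com/Sanskrutimore45/LP_3 | Ass5.py | solveNQueens2
-- ===== SOURCE A (Python) =====
-- def solveNQueens2(n: int, first_queen_col: int):
--     col = set()
--     posDiag = set()
--     negDiag = set()
--     res = []
--     board = [["."] * n for _ in range(n)]
--
--     def backtrack(r):
--         if r == n:
--             res.append(["".join(row) for row in board])
--             return
--         for c in range(n):
--             if c in col or (r + c) in posDiag or (r - c) in negDiag:
--                 continue
--             col.add(c)
--             posDiag.add(r + c)
--             negDiag.add(r - c)
--             board[r][c] = "I"  # Replace "Q" with "I" for this version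
--
--             backtrack(r + 1)
--
--             col.remove(c)
--             posDiag.remove(r + c)
--             negDiag.remove(r - c)
--             board[r][c] = "."
--
--     # Place the first queen in the specified column of the first row
--     col.add(first_queen_col)
--     posDiag.add(0 + first_queen_col)
--     negDiag.add(0 - first_queen_col)
--     board[0][first_queen_col] = "I"  # Replace "Q" with "I" for this version
--
--     # Start backtracking from the second row
--     backtrack(1)
--     return res
-- ===== SOURCE B (Python) =====
-- def solveNQueens2(n: int, first_queen_col: int):
--     # Breadth-first, level-by-level expansion: no recursion, no backtracking,
--     # no mutable board, no constraint sets; partials are immutable column lists.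
--     row0 = ["."] * n
--     row0[first_queen_col] = "I"
--     first_row = "".join(row0)
--     partials = [[first_queen_col]]
--     for r in range(1, n):
--         partials = [p + [c]
--                     for p in partials
--                     for c in range(n)
--                     if all(c != qc and r + c != qr + qc and r - c != qr - qc
--                            for qr, qc in enumerate(p))]
--     return [[first_row] + ["." * c + "I" + "." * (n - 1 - c) for c in p[1:]]
--             for p in partials]
-- ===== Notes on version B (the rewrite author's own statement) =====
-- stated objective: alternative
-- what changed: Replaces A's depth-first recursive backtracking with mutable board and three constraint sets by an iterative breadth-first level-by-level expansion: a list of immutable partial column placements is rebuilt by a comprehension for each row, with conflicts checked by scanning the partial, and boards are rendered arithmetically only at the end.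
import Mathlib
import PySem

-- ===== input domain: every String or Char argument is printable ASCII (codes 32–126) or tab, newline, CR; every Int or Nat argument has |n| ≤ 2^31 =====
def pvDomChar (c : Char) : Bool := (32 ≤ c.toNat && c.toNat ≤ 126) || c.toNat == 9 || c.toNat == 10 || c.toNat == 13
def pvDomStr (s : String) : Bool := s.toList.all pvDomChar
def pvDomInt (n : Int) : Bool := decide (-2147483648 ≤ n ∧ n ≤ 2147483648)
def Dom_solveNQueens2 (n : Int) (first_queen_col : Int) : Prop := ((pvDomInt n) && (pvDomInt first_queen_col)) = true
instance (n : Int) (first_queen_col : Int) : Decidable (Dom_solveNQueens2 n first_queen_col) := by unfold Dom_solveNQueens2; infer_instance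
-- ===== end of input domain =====

-- B replaces A's depth-first recursive backtracking (mutable board + three constraint
-- sets) by an iterative breadth-first level-by-level expansion of immutable partial
-- column placements (objective: alternative decomposition, similar cost).

-- ===== PORT A =====
-- Python `row[c] = v` (negative index wraps; always in range under Pre_)
def pySetRow (row : List String) (c : Int) (v : String) : List String :=
  row.set (if c < 0 then c + row.length else c).toNat v

-- Python `board[r][c] = v` for a nonnegative row index
def pySetCell (board : List (List String)) (r : Nat) (c : Int) (v : String) : List (List String) :=
  board.set r (pySetRow (board.getD r []) c v)

-- the inner `backtrack`; mutation + undo of the sets/board is ported by passing the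
-- updated values into the recursive call only
def btA (n : Int) (fuel : Nat) (r : Int) (col posD negD : PySem.Set Int)
    (board : List (List String)) : List (List String) :=
  if r = n then [board.map (fun row => PySem.Str.join "" row)]
  else match fuel with
  | 0 => []
  | fuel' + 1 =>
    (PySem.List.pyRange 0 n).foldl (fun res c =>
      if col.contains c || posD.contains (r + c) || negD.contains (r - c) then res
      else res ++ btA n fuel' (r + 1) (col.add c) (posD.add (r + c)) (negD.add (r - c))
             (pySetCell board r.toNat c "I")) []

def solveNQueens2 (n : Int) (first_queen_col : Int) : List (List String) :=
  let board := List.replicate n.toNat (List.replicate n.toNat ".")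
  let col := PySem.Set.empty.add first_queen_col
  let posD := PySem.Set.empty.add (0 + first_queen_col)
  let negD := PySem.Set.empty.add (0 - first_queen_col)
  let board := pySetCell board 0 first_queen_col "I"
  btA n n.toNat 1 col posD negD board

-- ===== PORT B =====
-- "." * c + "I" + "." * (n - 1 - c)
def rowStr (n c : Int) : String :=
  String.ofList (List.replicate c.toNat '.' ++ 'I' :: List.replicate (n - 1 - c).toNat '.')

-- the `all(...)` filter of the comprehension
def okB (r : Int) (p : List Int) (c : Int) : Bool :=
  (PySem.List.enumerate p).all
    (fun qp => c != qp.2 && r + c != qp.1 + qp.2 && r - c != qp.1 - qp.2)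

-- one level of the comprehension: [p + [c] for p in partials for c in range(n) if all(...)]
def stepB (n r : Int) (ps : List (List Int)) : List (List Int) :=
  ps.flatMap (fun p => ((PySem.List.pyRange 0 n).filter (okB r p)).map (fun c => p ++ [c]))

def solveNQueens2_alt (n : Int) (first_queen_col : Int) : List (List String) :=
  let row0 := pySetRow (List.replicate n.toNat ".") first_queen_col "I"
  let firstRow := PySem.Str.join "" row0
  let partials := (PySem.List.pyRange 1 n).foldl (fun ps r => stepB n r ps) [[first_queen_col]]
  partials.map (fun p => firstRow :: p.tail.map (rowStr n))

-- ===== PRECONDITION & SPEC =====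
-- A raises IndexError (board[0][first_queen_col] on an n×n board) iff n < 1 or
-- first_queen_col is outside [-n, n); Pre_ admits exactly the other inputs.
def Pre_solveNQueens2 (n : Int) (first_queen_col : Int) : Prop :=
  1 ≤ n ∧ -n ≤ first_queen_col ∧ first_queen_col < n
instance (n : Int) (first_queen_col : Int) : Decidable (Pre_solveNQueens2 n first_queen_col) := by
  unfold Pre_solveNQueens2; infer_instance

def pvWitness_solveNQueens2 : Int × Int := (4, 1)

def Spec_solveNQueens2 (n : Int) (first_queen_col : Int) (out : List (List String)) : Prop :=
  out = solveNQueens2_alt n first_queen_col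
instance (n : Int) (first_queen_col : Int) (out : List (List String)) :
    Decidable (Spec_solveNQueens2 n first_queen_col out) := by
  unfold Spec_solveNQueens2; infer_instance

-- ===== CLAIM (what is proved, stated in full; the proofs are below) =====
def Claim_equal_solveNQueens2 : Prop := ∀ (n : Int) (first_queen_col : Int),
  Dom_solveNQueens2 n first_queen_col → Pre_solveNQueens2 n first_queen_col →
  Spec_solveNQueens2 n first_queen_col (solveNQueens2 n first_queen_col)

-- ===== LEMMAS AND PROOFS =====

-- proof-only intermediate: A's recursion re-stated over the list of placed columns
def btRec (n : Int) (fuel : Nat) (r : Int) (cols : List Int) (firstRow : String) : List (List String) :=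
  if r = n then [firstRow :: cols.tail.map (rowStr n)]
  else match fuel with
  | 0 => []
  | fuel' + 1 =>
    (PySem.List.pyRange 0 n).foldl (fun res c =>
      if (PySem.List.enumerate cols).any (fun qp => c == qp.2 || r + c == qp.1 + qp.2 || r - c == qp.1 - qp.2)
      then res
      else res ++ btRec n fuel' (r + 1) (cols ++ [c]) firstRow) []

-- the characters of rowStr n c
def cellChars (n c : Int) : List Char :=
  List.replicate c.toNat '.' ++ 'I' :: List.replicate (n - 1 - c).toNat '.'

-- a board row carrying a queen at column c, as A's list of one-character cells
def rowA (n c : Int) : List String := (cellChars n c).map (fun ch => String.ofList [ch])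

-- A's board when the queens of `qs` (row = position) are placed
def boardOf (n : Int) (qs : List Int) : List (List String) :=
  qs.map (rowA n) ++ List.replicate (n.toNat - qs.length) (List.replicate n.toNat ".")

theorem enum_append {α : Type} (l : List α) (a : α) (s : Int) :
    PySem.List.enumerate (l ++ [a]) s = PySem.List.enumerate l s ++ [(s + l.length, a)] := by
  induction l generalizing s with
  | nil => simp [PySem.List.enumerate]
  | cons x t ih => simp [PySem.List.enumerate, ih (s + 1)]; ring_nf

theorem enum_map_snd {α : Type} (l : List α) (s : Int) :
    (PySem.List.enumerate l s).map Prod.snd = l := by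
  induction l generalizing s with
  | nil => simp [PySem.List.enumerate]
  | cons x t ih => simp [PySem.List.enumerate, ih (s + 1)]

theorem set_contains_eq {α : Type} [BEq α] (s : PySem.Set α) (x : α) :
    PySem.Set.contains s x = List.contains s x := rfl

theorem guard_eq (cols : List Int) (r c : Int) :
    (cols.contains c
      || ((PySem.List.enumerate cols).map (fun qp => qp.1 + qp.2)).contains (r + c)
      || ((PySem.List.enumerate cols).map (fun qp => qp.1 - qp.2)).contains (r - c))
    = (PySem.List.enumerate cols).any
        (fun qp => c == qp.2 || r + c == qp.1 + qp.2 || r - c == qp.1 - qp.2) := by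
  rw [Bool.eq_iff_iff]
  have hsnd : ∀ x : Int, x ∈ cols ↔ ∃ qp ∈ PySem.List.enumerate cols 0, qp.2 = x := by
    intro x
    conv_lhs => rw [← enum_map_snd cols 0]
    exact List.mem_map
  simp only [Bool.or_eq_true, List.contains_iff_mem, List.any_eq_true, List.mem_map,
    beq_iff_eq, hsnd c]
  constructor
  · rintro ((⟨qp, h, rfl⟩ | ⟨qp, h, he⟩) | ⟨qp, h, he⟩)
    · exact ⟨qp, h, Or.inl (Or.inl rfl)⟩
    · exact ⟨qp, h, Or.inl (Or.inr he.symm)⟩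
    · exact ⟨qp, h, Or.inr he.symm⟩
  · rintro ⟨qp, h, ((rfl | he) | he)⟩
    · exact Or.inl (Or.inl ⟨qp, h, rfl⟩)
    · exact Or.inl (Or.inr ⟨qp, h, he.symm⟩)
    · exact Or.inr ⟨qp, h, he.symm⟩

theorem set_replicate_dot (n w : Int) (h0 : 0 ≤ w) (hw : w < n) :
    (List.replicate n.toNat ("." : String)).set w.toNat "I" = rowA n w := by
  have hs : ("." : String) = String.ofList ['.'] := by decide
  have hI : ("I" : String) = String.ofList ['I'] := by decide
  have h1 : n.toNat = w.toNat + (1 + (n - 1 - w).toNat) := by omega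
  rw [h1, List.replicate_add, List.set_append]
  simp [rowA, cellChars, List.replicate_succ, Nat.add_comm 1, hs, hI]

theorem getD_boardOf (n : Int) (qs : List Int) (h : qs.length < n.toNat) :
    (boardOf n qs).getD qs.length [] = List.replicate n.toNat "." := by
  have hk : n.toNat - qs.length ≠ 0 := by omega
  simp [boardOf, List.getD, List.getElem?_append_right]
  cases hk' : n.toNat - qs.length with
  | zero => omega
  | succ k => simp [List.replicate_succ]

theorem setcell_boardOf (n : Int) (hn : 1 ≤ n) (qs : List Int) (c : Int)
    (hlen : qs.length < n.toNat) (hc : -n ≤ c) (hc' : c < n) :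
    pySetCell (boardOf n qs) qs.length c "I"
      = boardOf n (qs ++ [if c < 0 then c + n else c]) := by
  have hcast : ((n.toNat : Int)) = n := by omega
  have hrow := getD_boardOf n qs hlen
  set w : Int := if c < 0 then c + n else c with hw
  have hw0 : 0 ≤ w := by simp only [hw]; split <;> omega
  have hw1 : w < n := by simp only [hw]; split <;> omega
  unfold pySetCell pySetRow
  rw [hrow]
  have hwrap : (if c < 0 then c + ((List.replicate n.toNat ("." : String)).length : Int)
      else c) = w := by simp [hw, hcast]
  rw [hwrap, set_replicate_dot n w hw0 hw1]
  have hk : n.toNat - qs.length = 1 + (n.toNat - (qs.length + 1)) := by omega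
  simp only [boardOf]
  rw [List.set_append]
  simp only [List.length_map, lt_irrefl, Nat.sub_self]
  rw [hk, List.replicate_add]
  simp [List.replicate_succ]

theorem join_rowA (n c : Int) : PySem.Str.join "" (rowA n c) = rowStr n c := by
  unfold PySem.Str.join rowA rowStr cellChars
  simp only [List.map_map]
  have h : String.toList ∘ (fun ch => String.ofList [ch]) = fun ch => [ch] := by
    funext ch; simp
  rw [h]
  have h0 : ("" : String).toList = [] := by decide
  rw [h0, PySem.Chars.join_nil_singletons]

theorem leaf_boardOf (n : Int) (qs : List Int) (h : qs.length = n.toNat) :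
    (boardOf n qs).map (fun row => PySem.Str.join "" row) = qs.map (rowStr n) := by
  simp [boardOf, h, List.map_map, Function.comp, join_rowA]

theorem bt_leaf (n f0 : Int) (hn : 1 ≤ n)
    (fuel : Nat) (rest : List Int) (r : Int) (firstRow : String)
    (hr : r = 1 + (rest.length : Int)) (hrn : r = n)
    (hfr : firstRow = rowStr n (if f0 < 0 then f0 + n else f0)) :
    btA n fuel r (f0 :: rest)
      ((PySem.List.enumerate (f0 :: rest)).map (fun qp => qp.1 + qp.2))
      ((PySem.List.enumerate (f0 :: rest)).map (fun qp => qp.1 - qp.2))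
      (boardOf n ((if f0 < 0 then f0 + n else f0) :: rest))
    = btRec n fuel r (f0 :: rest) firstRow := by
  have hlen : ((if f0 < 0 then f0 + n else f0) :: rest).length = n.toNat := by
    simp only [List.length_cons]; omega
  rw [btA.eq_def, btRec.eq_def, if_pos hrn, if_pos hrn, leaf_boardOf n _ hlen]
  simp [hfr]

theorem bt_eq (n f0 : Int) (hn : 1 ≤ n) :
    ∀ (fuel : Nat) (rest : List Int) (r : Int) (firstRow : String),
      r = 1 + (rest.length : Int) → r ≤ n → n ≤ r + fuel →
      firstRow = rowStr n (if f0 < 0 then f0 + n else f0) →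
      btA n fuel r (f0 :: rest)
        ((PySem.List.enumerate (f0 :: rest)).map (fun qp => qp.1 + qp.2))
        ((PySem.List.enumerate (f0 :: rest)).map (fun qp => qp.1 - qp.2))
        (boardOf n ((if f0 < 0 then f0 + n else f0) :: rest))
      = btRec n fuel r (f0 :: rest) firstRow := by
  intro fuel
  induction fuel with
  | zero =>
    intro rest r firstRow hr hrn hfu hfr
    exact bt_leaf n f0 hn 0 rest r firstRow hr (by omega) hfr
  | succ k ih =>
    intro rest r firstRow hr hrn hfu hfr
    by_cases hrn' : r = n
    · exact bt_leaf n f0 hn (k + 1) rest r firstRow hr hrn' hfr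
    · rw [btA.eq_def, btRec.eq_def]
      simp only [if_neg hrn']
      apply PySem.List.foldl_congr_mem
      intro acc c hc
      rw [PySem.List.mem_pyRange_one] at hc
      simp only [set_contains_eq, guard_eq (f0 :: rest) r c]
      by_cases hg : ((PySem.List.enumerate (f0 :: rest)).any
          (fun qp => c == qp.2 || r + c == qp.1 + qp.2 || r - c == qp.1 - qp.2)) = true
      · simp only [if_pos hg]
      · simp only [if_neg hg]
        have hA := guard_eq (f0 :: rest) r c
        rw [eq_false_of_ne_true hg] at hA
        simp only [Bool.or_eq_false_iff] at hA
        obtain ⟨⟨hA1, hA2⟩, hA3⟩ := hA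
        congr 1
        have hA1' : ¬ c ∈ (f0 :: rest) := by
          rw [← List.contains_iff_mem, hA1]; exact Bool.false_ne_true
        have hA2' : ¬ (r + c) ∈ (PySem.List.enumerate (f0 :: rest)).map
            (fun qp => qp.1 + qp.2) := by
          rw [← List.contains_iff_mem, hA2]; exact Bool.false_ne_true
        have hA3' : ¬ (r - c) ∈ (PySem.List.enumerate (f0 :: rest)).map
            (fun qp => qp.1 - qp.2) := by
          rw [← List.contains_iff_mem, hA3]; exact Bool.false_ne_true
        have hcol : PySem.Set.add (f0 :: rest) c = f0 :: (rest ++ [c]) := by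
          simp [PySem.Set.add]
          simpa using hA1'
        have henum : PySem.List.enumerate (f0 :: (rest ++ [c]))
            = PySem.List.enumerate (f0 :: rest) ++ [((((f0 :: rest).length : Nat) : Int), c)] := by
          have := enum_append (f0 :: rest) c 0
          simpa using this
        have hpos : PySem.Set.add
              ((PySem.List.enumerate (f0 :: rest)).map (fun qp => qp.1 + qp.2)) (r + c)
            = (PySem.List.enumerate (f0 :: (rest ++ [c]))).map (fun qp => qp.1 + qp.2) := by
          rw [henum, List.map_append]
          unfold PySem.Set.add
          rw [set_contains_eq, hA2]
          simp
          omega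
        have hneg : PySem.Set.add
              ((PySem.List.enumerate (f0 :: rest)).map (fun qp => qp.1 - qp.2)) (r - c)
            = (PySem.List.enumerate (f0 :: (rest ++ [c]))).map (fun qp => qp.1 - qp.2) := by
          rw [henum, List.map_append]
          unfold PySem.Set.add
          rw [set_contains_eq, hA3]
          simp
          omega
        have hboard : pySetCell
              (boardOf n ((if f0 < 0 then f0 + n else f0) :: rest)) r.toNat c "I"
            = boardOf n ((if f0 < 0 then f0 + n else f0) :: (rest ++ [c])) := by
          have hrt : r.toNat = ((if f0 < 0 then f0 + n else f0) :: rest).length := by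
            simp only [List.length_cons]; omega
          rw [hrt]
          rw [setcell_boardOf n hn _ c (by simp only [List.length_cons]; omega)
            (by omega) (by omega)]
          have hcc : (if c < 0 then c + n else c) = c := by
            rw [if_neg (by omega : ¬ c < 0)]
          rw [hcc]
          simp
        rw [hcol, hpos, hneg, hboard]
        exact ih (rest ++ [c]) (r + 1) firstRow
          (by simp only [List.length_append, List.length_cons, List.length_nil]; push_cast; omega)
          (by omega) (by omega) hfr

-- ==== DFS (btRec) = BFS (stepB levels) ====

-- B's remaining loop from row r on, as a function of the current partials
def loopB (n r : Int) (ps : List (List Int)) : List (List Int) :=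
  (PySem.List.pyRange r n).foldl (fun ps' r' => stepB n r' ps') ps

theorem okB_eq_not_any (r : Int) (p : List Int) (c : Int) :
    okB r p c = !((PySem.List.enumerate p).any
      (fun qp => c == qp.2 || r + c == qp.1 + qp.2 || r - c == qp.1 - qp.2)) := by
  unfold okB
  induction PySem.List.enumerate p 0 with
  | nil => rfl
  | cons x t ih =>
    simp only [List.all_cons, List.any_cons, Bool.not_or, bne, Bool.and_assoc] at *
    rw [ih]

theorem stepB_append (n r : Int) (ps qs : List (List Int)) :
    stepB n r (ps ++ qs) = stepB n r ps ++ stepB n r qs := by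
  simp [stepB]

theorem foldl_step_append (n : Int) (l : List Int) :
    ∀ (ps qs : List (List Int)),
      l.foldl (fun ps' r' => stepB n r' ps') (ps ++ qs)
        = l.foldl (fun ps' r' => stepB n r' ps') ps
          ++ l.foldl (fun ps' r' => stepB n r' ps') qs := by
  induction l with
  | nil => intro ps qs; rfl
  | cons x t ih =>
    intro ps qs
    simp only [List.foldl_cons, stepB_append]
    exact ih _ _

theorem foldl_step_nil (n : Int) (l : List Int) :
    l.foldl (fun ps' r' => stepB n r' ps') [] = [] := by
  induction l with
  | nil => rfl
  | cons x t ih => simpa [stepB] using ih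

theorem loopB_map {α : Type} (n r : Int) (l : List α) (g : α → List Int) :
    loopB n r (l.map g) = l.flatMap (fun x => loopB n r [g x]) := by
  induction l with
  | nil => simpa [loopB] using foldl_step_nil n _
  | cons x t ih =>
    simp only [List.map_cons, List.flatMap_cons]
    unfold loopB at *
    rw [show (g x :: t.map g) = [g x] ++ t.map g from rfl, foldl_step_append, ih]

-- the guarded extend-fold of btRec is a flatMap over the okB-filtered candidates
theorem foldl_guard_extend (r : Int) (cols : List Int)
    (f : Int → List (List String)) (l : List Int) :
    ∀ acc, l.foldl (fun res c =>
        if (PySem.List.enumerate cols).any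
            (fun qp => c == qp.2 || r + c == qp.1 + qp.2 || r - c == qp.1 - qp.2)
        then res else res ++ f c) acc
      = acc ++ (l.filter (okB r cols)).flatMap f := by
  induction l with
  | nil => intro acc; simp
  | cons x t ih =>
    intro acc
    simp only [List.foldl_cons, List.filter_cons, okB_eq_not_any]
    by_cases hg : ((PySem.List.enumerate cols).any
        (fun qp => x == qp.2 || r + x == qp.1 + qp.2 || r - x == qp.1 - qp.2)) = true
    · simp [hg, ih]
    · simp only [eq_false_of_ne_true hg, Bool.not_false, if_pos,
        List.flatMap_cons, ih]
      simp
  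
theorem btRec_eq_loop (n : Int) :
    ∀ (fuel : Nat) (r : Int) (cols : List Int) (fr : String),
      r ≤ n → n ≤ r + fuel →
      btRec n fuel r cols fr
        = (loopB n r [cols]).map (fun p => fr :: p.tail.map (rowStr n)) := by
  intro fuel
  induction fuel with
  | zero =>
    intro r cols fr h1 h2
    have hrn : r = n := by omega
    rw [btRec.eq_def, if_pos hrn]
    simp [loopB, hrn, PySem.List.pyRange_one_eq_nil (le_refl n)]
  | succ k ih =>
    intro r cols fr h1 h2
    by_cases hrn : r = n
    · rw [btRec.eq_def, if_pos hrn]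
      simp [loopB, hrn, PySem.List.pyRange_one_eq_nil (le_refl n)]
    · have hrlt : r < n := by omega
      rw [btRec.eq_def, if_neg hrn]
      show (PySem.List.pyRange 0 n).foldl (fun res c =>
          if (PySem.List.enumerate cols).any
              (fun qp => c == qp.2 || r + c == qp.1 + qp.2 || r - c == qp.1 - qp.2)
          then res else res ++ btRec n k (r + 1) (cols ++ [c]) fr) []
        = (loopB n r [cols]).map (fun p => fr :: p.tail.map (rowStr n))
      rw [foldl_guard_extend r cols _ (PySem.List.pyRange 0 n) []]
      rw [List.nil_append]
      have hloop : loopB n r [cols] = loopB n (r + 1) (stepB n r [cols]) := by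
        unfold loopB
        rw [PySem.List.pyRange_one_cons hrlt]
        rfl
      have hstep : stepB n r [cols]
          = ((PySem.List.pyRange 0 n).filter (okB r cols)).map (fun c => cols ++ [c]) := by
        simp [stepB]
      rw [hloop, hstep, loopB_map, List.map_flatMap]
      apply List.flatMap_congr  -- pointwise: apply ih under the flatMap
      intro c hc
      exact ih (r + 1) (cols ++ [c]) fr (by omega) (by omega)

-- ===== VERDICT (by name: the statement is the Claim_ definition above) =====
theorem solveNQueens2_spec : Claim_equal_solveNQueens2 := by
  intro n f _hdom hpre
  obtain ⟨hn, hf0, hf1⟩ := hpre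
  unfold Spec_solveNQueens2
  show solveNQueens2 n f = solveNQueens2_alt n f
  have ha1 : PySem.Set.empty.add f = ([f] : PySem.Set Int) := by
    simp [PySem.Set.add, PySem.Set.empty]
  have ha2 : PySem.Set.empty.add (0 + f)
      = (PySem.List.enumerate ([f] : List Int)).map (fun qp => qp.1 + qp.2) := by
    simp [PySem.Set.add, PySem.Set.empty, PySem.List.enumerate]
  have ha3 : PySem.Set.empty.add (0 - f)
      = (PySem.List.enumerate ([f] : List Int)).map (fun qp => qp.1 - qp.2) := by
    simp [PySem.Set.add, PySem.Set.empty, PySem.List.enumerate]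
  have hb0 : List.replicate n.toNat (List.replicate n.toNat (".")) = boardOf n [] := by
    simp [boardOf]
  have hb := setcell_boardOf n hn [] f (by simp only [List.length_nil]; omega) hf0 hf1
  simp only [List.length_nil, List.nil_append] at hb
  have hfr : PySem.Str.join "" (pySetRow (List.replicate n.toNat ".") f "I")
      = rowStr n (if f < 0 then f + n else f) := by
    unfold pySetRow
    have hwrap : (if f < 0 then f + ((List.replicate n.toNat ("." : String)).length : Int)
        else f) = (if f < 0 then f + n else f) := by
      simp only [List.length_replicate]; split <;> omega
    rw [hwrap, set_replicate_dot n _ (by split <;> omega) (by split <;> omega), join_rowA]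
  have hmain := bt_eq n f hn n.toNat [] 1 _ (by simp) (by omega) (by omega) hfr
  have hloop := btRec_eq_loop n n.toNat 1 [f]
    (PySem.Str.join "" (pySetRow (List.replicate n.toNat ".") f "I")) (by omega) (by omega)
  simp only [solveNQueens2, solveNQueens2_alt]
  rw [ha1, ha2, ha3, hb0, hb, hmain, hloop]
  rfl
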